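-- pv_equiv track=rewrite | github.com/GitCaleffi/iot-caleffi | src/barcode_validator.py | _validate_ean8_check_digit
-- ===== SOURCE A (Python) =====
-- def _validate_ean8_check_digit(barcode):
--     """
--     Validate the check digit for an EAN-8 barcode.
--
--     Args:
--         barcode (str): 8-digit barcode string
--
--     Returns:
--         bool: True if check digit is valid
--     """
--     if len(barcode) != 8:
--         return False
--
--     # Calculate check digit
--     odd_sum = sum(int(barcode[i]) for i in range(0, 7, 2))
--     even_sum = sum(int(barcode[i]) for i in range(1, 7, 2))
--
--     total = (odd_sum * 3) + even_sum
--     check_digit = (10 - (total % 10)) % 10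
--
--     return check_digit == int(barcode[7])
-- ===== SOURCE B (Python) =====
-- def _validate_ean8_check_digit(barcode):
--     if len(barcode) != 8:
--         return False
--     acc = 0
--     rest = barcode
--     while rest:
--         acc = (acc + 3 * int(rest[0]) + int(rest[1])) % 10
--         rest = rest[2:]
--     return acc == 0
-- ===== Notes on version B (the rewrite author's own statement) =====
-- stated objective: alternative
-- what changed: Replaced the two strided comprehension sums and the derived expected check digit with a streaming loop that consumes the string two characters at a time, keeping only a running modulo-10 accumulator, and accepts iff the accumulator ends at 0.
-- outside the precondition, e.g. on _validate_ean8_check_digit('1234567a'): A raises ValueError, B raises ValueError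
import Mathlib
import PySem

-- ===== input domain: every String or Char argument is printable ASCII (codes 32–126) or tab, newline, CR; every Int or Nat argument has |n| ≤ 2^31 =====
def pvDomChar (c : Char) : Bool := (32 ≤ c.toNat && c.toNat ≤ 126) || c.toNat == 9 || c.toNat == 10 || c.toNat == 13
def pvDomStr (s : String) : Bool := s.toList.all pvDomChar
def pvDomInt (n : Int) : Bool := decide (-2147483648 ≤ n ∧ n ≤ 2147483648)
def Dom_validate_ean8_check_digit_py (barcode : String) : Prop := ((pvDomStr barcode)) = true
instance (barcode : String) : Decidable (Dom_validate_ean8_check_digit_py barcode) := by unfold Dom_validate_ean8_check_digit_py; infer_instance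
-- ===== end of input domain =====

-- B validates the check digit with a streaming pairwise loop keeping only a running mod-10
-- accumulator (accept iff it ends at 0), instead of A's two strided partial sums plus a
-- derived expected check digit; objective: alternative (same cost, different structure).


-- ===== PORT A =====
-- int(c) for a single character c; exact wherever Python's int(c) returns (Pre_ guarantees a digit)
def pvDigit (c : Char) : Int := (PySem.Int.ofChars? [c]).getD 0

def validate_ean8_check_digit_py (barcode : String) : Bool :=
  if PySem.Str.len barcode ≠ 8 then false
  else
    let cs := barcode.toList
    let odd_sum := (PySem.List.pyRange 0 7 2).foldl (fun acc i => acc + pvDigit (PySem.List.pyGetD cs i ' ')) 0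
    let even_sum := (PySem.List.pyRange 1 7 2).foldl (fun acc i => acc + pvDigit (PySem.List.pyGetD cs i ' ')) 0
    let total := odd_sum * 3 + even_sum
    let check_digit := PySem.Int.mod (10 - PySem.Int.mod total 10) 10
    decide (check_digit = pvDigit (PySem.List.pyGetD cs 7 ' '))

-- ===== PORT B =====
-- the while loop of Source B: consume two characters per step, keep a mod-10 accumulator
def pvLoop : List Char → Int → Int
  | c0 :: c1 :: rest, acc => pvLoop rest (PySem.Int.mod (acc + 3 * pvDigit c0 + pvDigit c1) 10)
  | [_], acc => acc  -- unreachable: the loop only runs on the 8-character string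
  | [], acc => acc

def validate_ean8_check_digit_py_alt (barcode : String) : Bool :=
  if PySem.Str.len barcode ≠ 8 then false
  else decide (pvLoop barcode.toList 0 = 0)

-- ===== PRECONDITION & SPEC =====
-- Pre_ excludes 8-character strings containing a non-digit character: there int(barcode[i])
-- raises ValueError in A (and B raises the same way); strings of any other length are admitted.
def Pre_validate_ean8_check_digit_py (barcode : String) : Prop :=
  barcode.toList.length = 8 → barcode.toList.all (fun c => c.isDigit) = true
instance (barcode : String) : Decidable (Pre_validate_ean8_check_digit_py barcode) := by
  unfold Pre_validate_ean8_check_digit_py; infer_instance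

def pvWitness_validate_ean8_check_digit_py : String := "40170725"

def Spec_validate_ean8_check_digit_py (barcode : String) (out : Bool) : Prop := out = validate_ean8_check_digit_py_alt barcode
instance (barcode : String) (out : Bool) : Decidable (Spec_validate_ean8_check_digit_py barcode out) := by unfold Spec_validate_ean8_check_digit_py; infer_instance

-- ===== CLAIM (what is proved, stated in full; the proofs are below) =====
def Claim_equal_validate_ean8_check_digit_py : Prop := ∀ (barcode : String), Dom_validate_ean8_check_digit_py barcode → Pre_validate_ean8_check_digit_py barcode → Spec_validate_ean8_check_digit_py barcode (validate_ean8_check_digit_py barcode)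

-- ===== LEMMAS AND PROOFS =====
theorem char_eq_of_toNat (c : Char) (n : Nat) (h : c.toNat = n) : c = Char.ofNat n := by
  apply Char.ext
  have := Char.ofNat_toNat c
  subst h
  exact congrArg Char.val this.symm

theorem pvDigit_bounds (c : Char) (h : c.isDigit = true) :
    0 ≤ pvDigit c ∧ pvDigit c ≤ 9 := by
  obtain ⟨h1, h2⟩ : 48 ≤ c.toNat ∧ c.toNat ≤ 57 := by simp [Char.isDigit] at h; exact h
  interval_cases hn : c.toNat <;> rw [char_eq_of_toNat c _ hn] <;> decide

theorem main_eq (barcode : String)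
    (hpre : barcode.toList.length = 8 → barcode.toList.all (fun c => c.isDigit) = true) :
    validate_ean8_check_digit_py barcode = validate_ean8_check_digit_py_alt barcode := by
  by_cases hl : barcode.toList.length = 8
  · obtain ⟨c0,c1,c2,c3,c4,c5,c6,c7,hcs⟩ :
        ∃ c0 c1 c2 c3 c4 c5 c6 c7, barcode.toList = [c0,c1,c2,c3,c4,c5,c6,c7] := by
      rcases h : barcode.toList with _|⟨c0,_|⟨c1,_|⟨c2,_|⟨c3,_|⟨c4,_|⟨c5,_|⟨c6,_|⟨c7,_|⟨c8,t⟩⟩⟩⟩⟩⟩⟩⟩⟩ <;>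
        simp [h] at hl ⊢
    have hd := hpre hl
    rw [hcs, List.all_eq_true] at hd
    have b0 := pvDigit_bounds c0 (hd c0 (by simp))
    have b1 := pvDigit_bounds c1 (hd c1 (by simp))
    have b2 := pvDigit_bounds c2 (hd c2 (by simp))
    have b3 := pvDigit_bounds c3 (hd c3 (by simp))
    have b4 := pvDigit_bounds c4 (hd c4 (by simp))
    have b5 := pvDigit_bounds c5 (hd c5 (by simp))
    have b6 := pvDigit_bounds c6 (hd c6 (by simp))
    have b7 := pvDigit_bounds c7 (hd c7 (by simp))
    have hlen : PySem.Str.len barcode = 8 := by simp [hcs]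
    unfold validate_ean8_check_digit_py validate_ean8_check_digit_py_alt
    rw [if_neg (by omega), if_neg (by omega)]
    have hr1 : PySem.List.pyRange 0 7 2 = [0, 2, 4, 6] := by decide
    have hr2 : PySem.List.pyRange 1 7 2 = [1, 3, 5] := by decide
    have e0 : PySem.List.pyGetD [c0,c1,c2,c3,c4,c5,c6,c7] 0 ' ' = c0 := rfl
    have e1 : PySem.List.pyGetD [c0,c1,c2,c3,c4,c5,c6,c7] 1 ' ' = c1 := rfl
    have e2 : PySem.List.pyGetD [c0,c1,c2,c3,c4,c5,c6,c7] 2 ' ' = c2 := rfl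
    have e3 : PySem.List.pyGetD [c0,c1,c2,c3,c4,c5,c6,c7] 3 ' ' = c3 := rfl
    have e4 : PySem.List.pyGetD [c0,c1,c2,c3,c4,c5,c6,c7] 4 ' ' = c4 := rfl
    have e5 : PySem.List.pyGetD [c0,c1,c2,c3,c4,c5,c6,c7] 5 ' ' = c5 := rfl
    have e6 : PySem.List.pyGetD [c0,c1,c2,c3,c4,c5,c6,c7] 6 ' ' = c6 := rfl
    have e7 : PySem.List.pyGetD [c0,c1,c2,c3,c4,c5,c6,c7] 7 ' ' = c7 := rfl
    simp only [hcs, hr1, hr2, List.foldl, pvLoop,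
      e0, e1, e2, e3, e4, e5, e6, e7, decide_eq_decide]
    norm_num [pysem]
    omega
  · have h1 : PySem.Str.len barcode ≠ 8 := by
      rw [PySem.Str.len_eq]
      exact fun hx => hl (by exact_mod_cast hx)
    unfold validate_ean8_check_digit_py validate_ean8_check_digit_py_alt
    rw [if_pos h1, if_pos h1]

-- ===== VERDICT (by name: the statement is the Claim_ definition above) =====
theorem validate_ean8_check_digit_py_spec : Claim_equal_validate_ean8_check_digit_py := by
  intro barcode _ hpre
  exact main_eq barcode hpre
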